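-- pv_equiv track=rewrite | github.com/time4ruin/kjh | arm/kj06_bitflip/flip.py | _emit_nops
-- ===== SOURCE A (Python) =====
-- MAX_NOP_PER_BLOCK = 8000
--
-- def _emit_nops(n: int) -> str:
--     blocks = []
--     remaining = max(0, int(n))
--     while remaining > 0:
--         chunk = min(remaining, MAX_NOP_PER_BLOCK)
--         blocks.append(f"NOP_REPEAT({chunk});")
--         remaining -= chunk
--     return ("\n\t" + "\n\t".join(blocks) + "\n\t") if blocks else "\n\t"
-- ===== SOURCE B (Python) =====
-- MAX_NOP_PER_BLOCK = 8000
--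
-- def _emit_nops(n: int) -> str:
--     q, r = divmod(max(0, int(n)), MAX_NOP_PER_BLOCK)
--     blocks = ["NOP_REPEAT(8000);"] * q + (["NOP_REPEAT(%d);" % r] if r > 0 else [])
--     return ("\n\t" + "\n\t".join(blocks) + "\n\t") if blocks else "\n\t"
-- ===== Notes on version B (the rewrite author's own statement) =====
-- stated objective: simpler
-- what changed: Replaces the chunk-peeling while loop with a single divmod closed form: the full-size blocks are built by list replication and one remainder block is appended only when the remainder is positive.
import Mathlib
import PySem

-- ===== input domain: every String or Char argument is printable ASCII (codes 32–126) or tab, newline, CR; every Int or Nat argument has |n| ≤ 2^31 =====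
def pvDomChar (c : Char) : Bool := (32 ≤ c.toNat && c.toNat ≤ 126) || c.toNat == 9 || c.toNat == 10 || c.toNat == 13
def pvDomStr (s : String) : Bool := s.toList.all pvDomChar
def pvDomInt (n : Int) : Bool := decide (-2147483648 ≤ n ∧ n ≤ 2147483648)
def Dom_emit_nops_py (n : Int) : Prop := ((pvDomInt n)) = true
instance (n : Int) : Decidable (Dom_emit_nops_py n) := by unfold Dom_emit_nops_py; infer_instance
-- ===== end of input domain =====

-- B replaces A's chunk-peeling while loop with a single divmod closed form (simpler).

-- ===== PORT A =====
-- the while loop of _emit_nops: state = (remaining, blocks); remaining tracked as a Nat (it is max(0,n))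
def emitNopsLoop : Nat → List String → List String
  | 0, blocks => blocks
  | r+1, blocks =>
      let chunk := min (r+1) 8000
      emitNopsLoop (r+1-chunk) (blocks ++ ["NOP_REPEAT(" ++ PySem.Int.toStr (chunk : Int) ++ ");"])
  decreasing_by omega

def emit_nops_py (n : Int) : String :=
  let blocks := emitNopsLoop (max 0 n).toNat []
  if blocks ≠ [] then "\n\t" ++ PySem.Str.join "\n\t" blocks ++ "\n\t" else "\n\t"

-- ===== PORT B =====
def emit_nops_py_alt (n : Int) : String :=
  let q := PySem.Int.floordiv (max 0 n) 8000
  let r := PySem.Int.mod (max 0 n) 8000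
  let blocks := List.replicate q.toNat "NOP_REPEAT(8000);" ++
      (if r > 0 then ["NOP_REPEAT(" ++ PySem.Int.toStr r ++ ");"] else [])
  if blocks ≠ [] then "\n\t" ++ PySem.Str.join "\n\t" blocks ++ "\n\t" else "\n\t"

-- ===== PRECONDITION & SPEC =====
def Spec_emit_nops_py (n : Int) (out : String) : Prop := out = emit_nops_py_alt n
instance (n : Int) (out : String) : Decidable (Spec_emit_nops_py n out) := by unfold Spec_emit_nops_py; infer_instance

-- ===== CLAIM (what is proved, stated in full; the proofs are below) =====
def Claim_equal_emit_nops_py : Prop := ∀ (n : Int), Dom_emit_nops_py n → Spec_emit_nops_py n (emit_nops_py n)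

-- ===== LEMMAS AND PROOFS =====

-- closed form of B's block list, over Nat
def nopsBlocks (m : Nat) : List String :=
  List.replicate (m / 8000) "NOP_REPEAT(8000);" ++
    (if m % 8000 > 0 then ["NOP_REPEAT(" ++ PySem.Int.toStr ((m % 8000 : Nat) : Int) ++ ");"] else [])

theorem nops_str_8000 : "NOP_REPEAT(" ++ PySem.Int.toStr (8000 : Int) ++ ");" = "NOP_REPEAT(8000);" := by
  have h1 : (PySem.Int.toStr (8000 : Int)).toList = "8000".toList := by decide
  have h : PySem.Int.toStr (8000 : Int) = "8000" := by
    have := congrArg String.ofList h1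
    simpa using this
  rw [h]; rfl

theorem emitNopsLoop_eq (m : Nat) (acc : List String) :
    emitNopsLoop m acc = acc ++ nopsBlocks m := by
  induction m using Nat.strong_induction_on generalizing acc with
  | _ m ih =>
    match m with
    | 0 => simp [emitNopsLoop, nopsBlocks]
    | r+1 =>
      rw [emitNopsLoop]
      by_cases h : r + 1 ≤ 8000
      · have hc : min (r+1) 8000 = r + 1 := by omega
        rw [hc]
        simp only [Nat.sub_self]
        rw [emitNopsLoop]
        by_cases h8 : r + 1 = 8000
        · rw [h8]
          norm_num [nopsBlocks, List.replicate, nops_str_8000]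
        · have hd : (r+1) / 8000 = 0 := Nat.div_eq_of_lt (by omega)
          have hm : (r+1) % 8000 = r + 1 := Nat.mod_eq_of_lt (by omega)
          simp [nopsBlocks, hd, hm]
      · have hc : min (r+1) 8000 = 8000 := by omega
        rw [hc]
        rw [ih (r+1-8000) (by omega)]
        have hd : (r+1) / 8000 = (r+1-8000) / 8000 + 1 :=
          Nat.div_eq_sub_div (by norm_num) (by omega)
        have hm : (r+1) % 8000 = (r+1-8000) % 8000 :=
          Nat.mod_eq_sub_mod (by omega)
        unfold nopsBlocks
        rw [hd, hm, List.replicate_succ]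
        simp only [Nat.cast_ofNat, nops_str_8000, List.append_assoc, List.singleton_append]
        rw [List.cons_append]

-- ===== VERDICT (by name: the statement is the Claim_ definition above) =====

theorem emit_nops_py_spec : Claim_equal_emit_nops_py := by
  intro n _
  unfold Spec_emit_nops_py emit_nops_py emit_nops_py_alt
  set m : Nat := (max 0 n).toNat with hm
  have hmn : (max 0 n) = (m : Int) := by omega
  rw [emitNopsLoop_eq, hmn]
  have hq : PySem.Int.floordiv (m : Int) 8000 = ((m / 8000 : Nat) : Int) := by
    exact_mod_cast PySem.Int.floordiv_natCast m 8000
  have hr : PySem.Int.mod (m : Int) 8000 = ((m % 8000 : Nat) : Int) := by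
    exact_mod_cast PySem.Int.mod_natCast m 8000
  rw [hq, hr]
  simp only [nopsBlocks, List.nil_append, Int.toNat_natCast, gt_iff_lt, Int.natCast_pos]
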